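-- pv_equiv track=rewrite | github.com/AATHILDUCKY/duckie | tiny_duckie_bot.py | _format_command
-- ===== SOURCE A (Python) =====
-- def _format_command(command: str) -> str:
--     """Format multi-line commands with proper indentation"""
--     lines = command.split('\n')
--     if len(lines) == 1:
--         return command
--
--     formatted_lines = []
--     for i, line in enumerate(lines):
--         if i == 0:
--             formatted_lines.append(line)
--         else:
--             formatted_lines.append(f"    {line.lstrip()}")
--     return '\n'.join(formatted_lines)
-- ===== SOURCE B (Python) =====
-- def _format_command(command: str) -> str:
--     # Single pass: rewrite each newline to "\n    " and drop the whitespace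
--     # that immediately follows it; the first line is left untouched.
--     out = []
--     skip = False
--     for ch in command:
--         if ch == '\n':
--             out.append('\n    ')
--             skip = True
--         elif skip and ch.isspace():
--             pass
--         else:
--             out.append(ch)
--             skip = False
--     return ''.join(out)
-- ===== Notes on version B (the rewrite author's own statement) =====
-- stated objective: alternative
-- what changed: Replaced the split-into-lines + enumerate loop + lstrip + join pipeline with a single character-level pass over the string that rewrites each newline to a newline plus four spaces and skips the whitespace run that follows it; no list of lines is ever built.
import Mathlib
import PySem

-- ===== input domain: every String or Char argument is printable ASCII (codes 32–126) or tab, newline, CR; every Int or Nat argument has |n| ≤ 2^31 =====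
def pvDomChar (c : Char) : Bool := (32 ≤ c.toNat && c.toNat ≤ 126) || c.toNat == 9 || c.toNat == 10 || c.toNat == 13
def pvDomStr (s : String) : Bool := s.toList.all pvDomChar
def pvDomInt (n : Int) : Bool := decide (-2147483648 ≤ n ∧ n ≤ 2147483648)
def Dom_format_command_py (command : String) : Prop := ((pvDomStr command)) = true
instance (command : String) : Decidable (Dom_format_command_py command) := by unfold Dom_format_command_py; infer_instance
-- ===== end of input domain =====

-- B replaces A's split('\n') / enumerate-loop / lstrip / join over a list of lines with a single
-- character-level pass (newline ↦ newline + four spaces, then skip the following whitespace run);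
-- objective: alternative (same O(n) cost, no list of lines built).

-- ===== PORT A =====
def format_command_py (command : String) : String :=
  let lines := PySem.Chars.splitOn command.toList ['\n']
  if lines.length = 1 then command
  else
    let formatted_lines := (PySem.List.enumerate lines).foldl
      (fun acc p =>
        if p.1 = 0 then acc ++ [p.2]
        else acc ++ [' ' :: ' ' :: ' ' :: ' ' :: PySem.Chars.lstrip p.2]) []
    String.ofList (PySem.Chars.join ['\n'] formatted_lines)

-- ===== PORT B =====
-- the for-loop of Source B: state = (remaining chars, skip flag); output built front-to-back
def altGo : List Char → Bool → List Char
  | [], _ => []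
  | c :: rest, skip =>
    if c = '\n' then '\n' :: ' ' :: ' ' :: ' ' :: ' ' :: altGo rest true
    else if skip && PySem.Chars.isspace c then altGo rest true
    else c :: altGo rest false

def format_command_py_alt (command : String) : String :=
  String.ofList (altGo command.toList false)

-- ===== PRECONDITION & SPEC =====
def Spec_format_command_py (command : String) (out : String) : Prop := out = format_command_py_alt command
instance (command : String) (out : String) : Decidable (Spec_format_command_py command out) := by unfold Spec_format_command_py; infer_instance

-- ===== CLAIM (what is proved, stated in full; the proofs are below) =====
def Claim_equal_format_command_py : Prop := ∀ (command : String), Dom_format_command_py command → Spec_format_command_py command (format_command_py command)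

-- ===== LEMMAS AND PROOFS =====

def mySplit : List Char → List Char × List (List Char)
  | [] => ([], [])
  | c :: r => if c = '\n' then ([], (mySplit r).1 :: (mySplit r).2)
              else (c :: (mySplit r).1, (mySplit r).2)

theorem go_spec (l : List Char) : ∀ (fuel : Nat), l.length < fuel → ∀ (cur : List Char) (acc : List (List Char)),
    PySem.Chars.splitOn.go ['\n'] fuel l cur acc
      = acc.reverse ++ (cur.reverse ++ (mySplit l).1) :: (mySplit l).2 := by
  induction l with
  | nil =>
    intro fuel hf cur acc
    match fuel, hf with
    | fuel+1, _ => simp [PySem.Chars.splitOn.go, mySplit]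
  | cons c r ih =>
    intro fuel hf cur acc
    match fuel, hf with
    | fuel+1, hf =>
      by_cases hc : c = '\n'
      · subst hc
        have hpre : List.isPrefixOf ['\n'] ('\n' :: r) = true := by
          simp [List.isPrefixOf]
        rw [PySem.Chars.splitOn.go]
        simp only [hpre, if_pos]
        simp only [List.length_cons, List.length_nil, List.drop_succ_cons, List.drop_zero]
        rw [ih fuel (by simpa using Nat.lt_of_succ_lt_succ hf) [] ((List.reverse cur) :: acc)]
        simp [mySplit]
      · have hpre : List.isPrefixOf ['\n'] (c :: r) = false := by
          simp [List.isPrefixOf]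
          intro h; exact absurd h.symm hc
        rw [PySem.Chars.splitOn.go]
        simp only [hpre, Bool.false_eq_true, if_false]
        rw [ih fuel (by simpa using Nat.lt_of_succ_lt_succ hf) (c :: cur) acc]
        simp [mySplit, hc]

def indLine (l : List Char) : List Char :=
  '\n' :: ' ' :: ' ' :: ' ' :: ' ' :: PySem.Chars.lstrip l

theorem splitOn_eq (cs : List Char) :
    PySem.Chars.splitOn cs ['\n'] = (mySplit cs).1 :: (mySplit cs).2 := by
  have := go_spec cs (cs.length + 1) (Nat.lt_succ_self _) [] []
  simpa [PySem.Chars.splitOn] using this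

theorem mySplit_no_tail (cs : List Char) (h : (mySplit cs).2 = []) : (mySplit cs).1 = cs := by
  induction cs with
  | nil => rfl
  | cons c r ih =>
    by_cases hc : c = '\n'
    · subst hc; simp [mySplit] at h
    · simp only [mySplit, hc, if_false] at h ⊢
      simp [ih h]

theorem altGo_spec (cs : List Char) :
    altGo cs false = (mySplit cs).1 ++ ((mySplit cs).2.map indLine).flatten
    ∧ altGo cs true = PySem.Chars.lstrip (mySplit cs).1 ++ ((mySplit cs).2.map indLine).flatten := by
  induction cs with
  | nil => simp [altGo, mySplit, PySem.Chars.lstrip]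
  | cons c r ih =>
    obtain ⟨ih1, ih2⟩ := ih
    by_cases hc : c = '\n'
    · subst hc
      constructor
      · simp [altGo, mySplit, ih2, indLine]
      · simp [altGo, mySplit, ih2, indLine, PySem.Chars.lstrip]
    · constructor
      · simp [altGo, hc, mySplit, ih1]
      · by_cases hs : PySem.Chars.isspace c
        · simp [altGo, hc, hs, mySplit, ih2, PySem.Chars.lstrip, List.dropWhile_cons_of_pos]
        · simp [altGo, hc, hs, mySplit, ih1, PySem.Chars.lstrip, List.dropWhile_cons_of_neg]

def fStep (acc : List (List Char)) (p : Int × List Char) : List (List Char) :=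
  if p.1 = 0 then acc ++ [p.2]
  else acc ++ [' ' :: ' ' :: ' ' :: ' ' :: PySem.Chars.lstrip p.2]

theorem foldl_enum (t : List (List Char)) : ∀ (k : Int), 1 ≤ k → ∀ (acc : List (List Char)),
    (PySem.List.enumerate t k).foldl fStep acc
      = acc ++ t.map (fun l => ' ' :: ' ' :: ' ' :: ' ' :: PySem.Chars.lstrip l) := by
  induction t with
  | nil => intro k hk acc; simp [PySem.List.enumerate]
  | cons h t ih =>
    intro k hk acc
    rw [PySem.List.enumerate]
    simp only [List.foldl_cons]
    rw [ih (k+1) (by omega)]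
    have hk0 : k ≠ 0 := by omega
    simp [fStep, hk0]

theorem join_cons (xs : List (List Char)) (x : List Char) :
    PySem.Chars.join ['\n'] (x :: xs) = x ++ (xs.map (fun l => '\n' :: l)).flatten := by
  induction xs generalizing x with
  | nil => simp [PySem.Chars.join_singleton]
  | cons y ys ih =>
    rw [PySem.Chars.join_cons_cons, ih y]
    simp

theorem main_eq (command : String) : format_command_py command = format_command_py_alt command := by
  unfold format_command_py format_command_py_alt
  rw [splitOn_eq]
  rcases ht : (mySplit command.toList).2 with _ | ⟨y, ys⟩
  · simp only [List.length_cons, List.length_nil, if_pos]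
    rw [(altGo_spec command.toList).1, ht, mySplit_no_tail _ ht]
    simp [String.ofList_toList]
  · simp only [List.length_cons]
    rw [if_neg (by omega : ¬ (ys.length + 1 + 1 = 1))]
    rw [PySem.List.enumerate]
    have hstep : (fun (acc : List (List Char)) (p : Int × List Char) =>
        if p.1 = 0 then acc ++ [p.2]
        else acc ++ [' ' :: ' ' :: ' ' :: ' ' :: PySem.Chars.lstrip p.2]) = fStep := by
      funext acc p; rfl
    rw [hstep]
    simp only [List.foldl_cons]
    rw [show (0:Int)+1 = 1 from rfl, foldl_enum _ 1 (le_refl _)]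
    simp only [fStep, if_true, List.nil_append]
    simp only [List.cons_append, List.nil_append]
    rw [join_cons]
    rw [(altGo_spec command.toList).1, ht]
    have hind : indLine = fun x => '\n' :: ' ' :: ' ' :: ' ' :: ' ' :: PySem.Chars.lstrip x := by
      funext l; rfl
    rw [hind]
    simp [Function.comp_def]


-- ===== VERDICT (by name: the statement is the Claim_ definition above) =====
theorem format_command_py_spec : Claim_equal_format_command_py := by
  intro command _
  unfold Spec_format_command_py
  exact main_eq command
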